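-- pv_equiv track=rewrite | github.com/WeilabMSU/PKHT | KHcomplex.py | is_valid_map
-- ===== SOURCE A (Python) =====
-- def is_valid_map(pre_state_string, post_state_string):
--     """Check if the map is valid (exactly one '0' changes to '1') and return the index."""
--     change_index = -1
--     for i, (pre, post) in enumerate(zip(pre_state_string, post_state_string)):
--         if pre == '0' and post == '1':
--             if change_index != -1:
--                 return False, -1  # More than one change detected
--             change_index = i
--         elif pre != post:
--             return False, -1  # Invalid change detected
--     return change_index != -1, change_index
-- ===== SOURCE B (Python) =====
-- def is_valid_map(pre_state_string, post_state_string):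
--     """Advance past the common prefix, then check a single '0'->'1' flip and equal suffixes."""
--     n = min(len(pre_state_string), len(post_state_string))
--     i = 0
--     while i < n and pre_state_string[i] == post_state_string[i]:
--         i += 1
--     if i == n:
--         return False, -1
--     if (pre_state_string[i] == '0' and post_state_string[i] == '1'
--             and pre_state_string[i + 1:n] == post_state_string[i + 1:n]):
--         return True, i
--     return False, -1
-- ===== Notes on version B (the rewrite author's own statement) =====
-- stated objective: alternative
-- what changed: A does a single enumerate-zip pass with a running change_index accumulator and early returns; B instead advances an index past the common prefix with a while loop, then decides with one character test plus a slice-equality comparison of the remaining suffixes (no accumulator, no scan past the first mismatch by hand).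
import Mathlib
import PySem

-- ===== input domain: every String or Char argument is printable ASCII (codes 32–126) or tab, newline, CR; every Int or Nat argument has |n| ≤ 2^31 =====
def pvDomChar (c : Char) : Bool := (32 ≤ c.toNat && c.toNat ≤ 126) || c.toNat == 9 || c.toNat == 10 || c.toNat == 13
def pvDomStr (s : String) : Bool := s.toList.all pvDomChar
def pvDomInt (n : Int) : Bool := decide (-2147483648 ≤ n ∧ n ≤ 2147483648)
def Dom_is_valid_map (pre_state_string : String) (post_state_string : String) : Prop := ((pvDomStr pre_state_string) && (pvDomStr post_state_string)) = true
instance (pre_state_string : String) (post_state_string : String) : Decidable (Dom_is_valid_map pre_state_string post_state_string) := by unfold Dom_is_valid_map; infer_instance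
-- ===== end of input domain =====

-- ===== PORT A =====
-- B replaces A's accumulator pass by a common-prefix scan plus one character test and a
-- slice-equality check of the suffixes (alternative decomposition, same cost).
def pvLoopA : List (Int × (Char × Char)) → Int → Bool × Int
  | [], c => (c != -1, c)
  | (i, (p, q)) :: rest, c =>
    if p = '0' ∧ q = '1' then
      if c ≠ -1 then (false, -1) else pvLoopA rest i
    else if p ≠ q then (false, -1)
    else pvLoopA rest c

def is_valid_map (pre_state_string : String) (post_state_string : String) : Bool × Int :=
  pvLoopA (PySem.List.enumerate (pre_state_string.toList.zip post_state_string.toList) 0) (-1)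

-- ===== PORT B =====
-- the while loop: advance i past the common prefix (i < n guarantees both getD hit in range,
-- exactly like Python's in-range indexing)
def pvScanB (a b : List Char) (n : Nat) (i : Nat) : Nat :=
  if i < n then
    if a.getD i ' ' = b.getD i ' ' then pvScanB a b n (i + 1) else i
  else i
termination_by n - i

def is_valid_map_alt (pre_state_string : String) (post_state_string : String) : Bool × Int :=
  let a := pre_state_string.toList
  let b := post_state_string.toList
  let n := min a.length b.length
  let i := pvScanB a b n 0
  if i = n then (false, -1)
  else if a.getD i ' ' = '0' ∧ b.getD i ' ' = '1' ∧
      PySem.List.slice a (some ((i : Int) + 1)) (some (n : Int)) =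
        PySem.List.slice b (some ((i : Int) + 1)) (some (n : Int)) then
    (true, (i : Int))
  else (false, -1)

-- ===== PRECONDITION & SPEC =====
def Spec_is_valid_map (pre_state_string : String) (post_state_string : String) (out : Bool × Int) : Prop := out = is_valid_map_alt pre_state_string post_state_string
instance (pre_state_string : String) (post_state_string : String) (out : Bool × Int) : Decidable (Spec_is_valid_map pre_state_string post_state_string out) := by unfold Spec_is_valid_map; infer_instance

-- ===== CLAIM (what is proved, stated in full; the proofs are below) =====
def Claim_equal_is_valid_map : Prop := ∀ (pre_state_string : String) (post_state_string : String), Dom_is_valid_map pre_state_string post_state_string → Spec_is_valid_map pre_state_string post_state_string (is_valid_map pre_state_string post_state_string)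

-- ===== LEMMAS AND PROOFS =====

-- length of the equal prefix of a list of pairs
def pvEqLen : List (Char × Char) → Nat
  | [] => 0
  | (p, q) :: t => if p = q then pvEqLen t + 1 else 0

theorem pvEqLen_le (t : List (Char × Char)) : pvEqLen t ≤ t.length := by
  induction t with
  | nil => simp [pvEqLen]
  | cons hd tl ih =>
    obtain ⟨p, q⟩ := hd
    by_cases h : p = q
    · simp [pvEqLen, h]; omega
    · simp [pvEqLen, h]

-- the filtered difference list, characterised through the equal-prefix length
theorem pvFilterEnum (t : List (Char × Char)) (k : Int) :
    (PySem.List.enumerate t k).filter (fun x => x.2.1 != x.2.2) =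
      if h : pvEqLen t < t.length then
        (k + (pvEqLen t : Int), t[pvEqLen t]) ::
          (PySem.List.enumerate (t.drop (pvEqLen t + 1)) (k + (pvEqLen t : Int) + 1)).filter
            (fun x => x.2.1 != x.2.2)
      else [] := by
  induction t generalizing k with
  | nil => simp [pvEqLen, PySem.List.enumerate_nil]
  | cons hd tl ih =>
    obtain ⟨p, q⟩ := hd
    rw [PySem.List.enumerate_cons, List.filter_cons]
    by_cases hpq : p = q
    · subst hpq
      rw [if_neg (by simp : ¬((p != p) = true)), ih (k + 1)]
      have he : pvEqLen ((p, p) :: tl) = pvEqLen tl + 1 := by simp [pvEqLen]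
      by_cases h : pvEqLen tl < tl.length
      · have h2 : pvEqLen ((p, p) :: tl) < ((p, p) :: tl).length := by simp [he]; omega
        rw [dif_pos h, dif_pos h2]
        have hidx : ((p, p) :: tl)[pvEqLen ((p, p) :: tl)]'h2 = tl[pvEqLen tl]'h := by
          simp [he]
        have hdrop : ((p, p) :: tl).drop (pvEqLen ((p, p) :: tl) + 1) =
            tl.drop (pvEqLen tl + 1) := by simp [he]
        have harith : (k : Int) + (pvEqLen ((p, p) :: tl) : Int) = k + 1 + (pvEqLen tl : Int) := by
          rw [he]; push_cast; ring
        rw [hidx, hdrop, harith]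
      · rw [dif_neg h, dif_neg (by simp [he]; omega)]
    · rw [if_pos (bne_iff_ne.mpr hpq)]
      have he : pvEqLen ((p, q) :: tl) = 0 := by simp [pvEqLen, hpq]
      have h2 : pvEqLen ((p, q) :: tl) < ((p, q) :: tl).length := by simp [he]
      rw [dif_pos h2]
      simp [he]

theorem pvFilterNil (t : List (Char × Char)) (k : Int) :
    (PySem.List.enumerate t k).filter (fun x => x.2.1 != x.2.2) = [] ↔
      pvEqLen t = t.length := by
  rw [pvFilterEnum t k]
  by_cases h : pvEqLen t < t.length
  · rw [dif_pos h]
    simp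
    omega
  · rw [dif_neg h]
    have := pvEqLen_le t
    simp
    omega

-- the while loop computes the equal-prefix length of the remaining zipped pairs
theorem pvScan_eq_aux (a b : List Char) (m : Nat) :
    ∀ j : Nat, min a.length b.length - j ≤ m →
      pvScanB a b (min a.length b.length) j = j + pvEqLen ((a.zip b).drop j) := by
  induction m with
  | zero =>
    intro j h
    have hj : ¬ j < min a.length b.length := by omega
    rw [pvScanB, if_neg hj, List.drop_of_length_le (by simp; omega)]
    simp [pvEqLen]
  | succ m ih =>
    intro j h
    by_cases hj : j < min a.length b.length
    · have hjl : j < (a.zip b).length := by simpa using hj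
      rw [List.drop_eq_getElem_cons hjl, List.getElem_zip]
      have hga : a.getD j ' ' = a[j]'(by omega) := List.getD_eq_getElem a ' ' (by omega)
      have hgb : b.getD j ' ' = b[j]'(by omega) := List.getD_eq_getElem b ' ' (by omega)
      rw [pvScanB, if_pos hj, hga, hgb]
      by_cases heq : a[j]'(by omega) = b[j]'(by omega)
      · rw [if_pos heq, ih (j + 1) (by omega)]
        have : pvEqLen ((a[j]'(by omega), b[j]'(by omega)) :: (a.zip b).drop (j + 1)) =
            pvEqLen ((a.zip b).drop (j + 1)) + 1 := by simp [pvEqLen, heq]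
        omega
      · rw [if_neg heq]
        have : pvEqLen ((a[j]'(by omega), b[j]'(by omega)) :: (a.zip b).drop (j + 1)) = 0 := by
          simp [pvEqLen, heq]
        omega
    · rw [pvScanB, if_neg hj, List.drop_of_length_le (by simp; omega)]
      simp [pvEqLen]

theorem pvScan_eq (a b : List Char) :
    pvScanB a b (min a.length b.length) 0 = pvEqLen (a.zip b) := by
  have := pvScan_eq_aux a b (min a.length b.length) 0 (by omega)
  simpa using this

-- equal-length lists are equal iff their zip has a full equal prefix
theorem pvEqPairs (x : List Char) : ∀ y : List Char, x.length = y.length →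
    (x = y ↔ pvEqLen (x.zip y) = (x.zip y).length) := by
  induction x with
  | nil => intro y h; cases y <;> simp_all [pvEqLen]
  | cons p x' ih =>
    intro y h
    cases y with
    | nil => simp at h
    | cons q y' =>
      simp only [List.zip_cons_cons]
      by_cases hpq : p = q
      · subst hpq
        have := ih y' (by simpa using h)
        simp [pvEqLen, this]
      · constructor
        · intro hc; simp [hpq] at hc
        · intro hc; exfalso; simp [pvEqLen, hpq] at hc

-- With a non-sentinel accumulator, A's loop succeeds iff no further difference occurs.
theorem pvLoopA_found (l : List (Int × (Char × Char))) (c : Int) (hc : c ≠ -1) :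
    pvLoopA l c = if l.filter (fun x => x.2.1 != x.2.2) = [] then (true, c) else (false, -1) := by
  induction l with
  | nil => simp [pvLoopA, hc]
  | cons hd tl ih =>
    obtain ⟨i, p, q⟩ := hd
    rw [List.filter_cons]
    by_cases hpq : p = q
    · subst hpq
      have h01 : ¬(p = '0' ∧ p = '1') := by
        rintro ⟨h1, h2⟩; rw [h1] at h2; exact absurd h2 (by decide)
      rw [pvLoopA, if_neg h01, if_neg (by simp), ih,
        if_neg (by simp : ¬((p != p) = true))]
    · have hb : (p != q) = true := bne_iff_ne.mpr hpq
      rw [if_pos hb]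
      by_cases h01 : p = '0' ∧ q = '1'
      · rw [pvLoopA, if_pos h01, if_pos hc, if_neg (List.cons_ne_nil _ _)]
      · rw [pvLoopA, if_neg h01, if_pos hpq, if_neg (List.cons_ne_nil _ _)]

-- Starting from the sentinel, A's loop classifies the list of differences.
theorem pvLoopA_start (l : List (Int × (Char × Char))) (h : ∀ x ∈ l, x.1 ≠ -1) :
    pvLoopA l (-1) =
      match l.filter (fun x => x.2.1 != x.2.2) with
      | [(i, (p, q))] => if p = '0' ∧ q = '1' then (true, i) else (false, -1)
      | _ => (false, -1) := by
  induction l with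
  | nil => simp [pvLoopA]
  | cons hd tl ih =>
    obtain ⟨i, p, q⟩ := hd
    have hi : i ≠ -1 := h (i, p, q) (List.mem_cons_self ..)
    rw [List.filter_cons]
    by_cases hpq : p = q
    · subst hpq
      have h01 : ¬(p = '0' ∧ p = '1') := by
        rintro ⟨h1, h2⟩; rw [h1] at h2; exact absurd h2 (by decide)
      rw [pvLoopA, if_neg h01, if_neg (by simp),
        ih (fun x hx => h x (List.mem_cons_of_mem _ hx)),
        if_neg (by simp : ¬((p != p) = true))]
    · have hb : (p != q) = true := bne_iff_ne.mpr hpq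
      rw [if_pos hb]
      by_cases h01 : p = '0' ∧ q = '1'
      · rw [pvLoopA, if_pos h01, if_neg (by simp : ¬((-1 : Int) ≠ -1)),
          pvLoopA_found tl i hi]
        by_cases htl : tl.filter (fun x => x.2.1 != x.2.2) = []
        · rw [if_pos htl, htl]
          show (true, i) = if p = '0' ∧ q = '1' then (true, i) else (false, -1)
          rw [if_pos h01]
        · rw [if_neg htl]
          rcases List.exists_cons_of_ne_nil htl with ⟨y, ys, hys⟩
          rw [hys]
      · rw [pvLoopA, if_neg h01, if_pos hpq]
        by_cases htl : tl.filter (fun x => x.2.1 != x.2.2) = []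
        · rw [htl]
          show (false, -1) = if p = '0' ∧ q = '1' then (true, i) else (false, -1)
          rw [if_neg h01]
        · rcases List.exists_cons_of_ne_nil htl with ⟨y, ys, hys⟩
          rw [hys]

-- B classifies the same way as A's difference list.
theorem pvAltEq (pre post : String) :
    is_valid_map_alt pre post =
      match (PySem.List.enumerate (pre.toList.zip post.toList) 0).filter
          (fun x => x.2.1 != x.2.2) with
      | [(i, (p, q))] => if p = '0' ∧ q = '1' then (true, i) else (false, -1)
      | _ => (false, -1) := by
  unfold is_valid_map_alt
  dsimp only
  set a := pre.toList with ha
  set b := post.toList with hb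
  set l := a.zip b with hl
  have hn : l.length = min a.length b.length := by simp [hl]
  rw [pvScan_eq a b]
  set e := pvEqLen l with he
  rw [pvFilterEnum l 0]
  by_cases hlt : e < l.length
  · rw [dif_pos hlt]
    have hne : ¬ e = min a.length b.length := by omega
    rw [if_neg hne]
    have hea : e < a.length := by omega
    have heb : e < b.length := by omega
    have hga : a.getD e ' ' = a[e] := List.getD_eq_getElem a ' ' hea
    have hgb : b.getD e ' ' = b[e] := List.getD_eq_getElem b ' ' heb
    have hle : l[e]'hlt = (a[e], b[e]) := List.getElem_zip
    -- the slices
    have hcast : ((e : Int) + 1) = (((e + 1 : Nat) : Int)) := by push_cast; ring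
    have hsa : PySem.List.slice a (some ((e : Int) + 1)) (some ((min a.length b.length : Nat) : Int)) =
        (a.drop (e + 1)).take (min a.length b.length - (e + 1)) := by
      rw [hcast, PySem.List.slice_natCast]
    have hsb : PySem.List.slice b (some ((e : Int) + 1)) (some ((min a.length b.length : Nat) : Int)) =
        (b.drop (e + 1)).take (min a.length b.length - (e + 1)) := by
      rw [hcast, PySem.List.slice_natCast]
    rw [hga, hgb, hsa, hsb]
    -- the suffix slices are equal iff the remaining difference list is empty
    have hdz : l.drop (e + 1) = (a.drop (e + 1)).zip (b.drop (e + 1)) := by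
      rw [hl]; simp [List.zip, List.drop_zipWith]
    have hzt : ((a.drop (e + 1)).take (min a.length b.length - (e + 1))).zip
          ((b.drop (e + 1)).take (min a.length b.length - (e + 1))) = l.drop (e + 1) := by
      rw [hdz, List.zip_eq_zipWith, List.zip_eq_zipWith, ← List.take_zipWith]
      exact List.take_of_length_le (by simp; omega)
    have hsuffix : ((a.drop (e + 1)).take (min a.length b.length - (e + 1)) =
          (b.drop (e + 1)).take (min a.length b.length - (e + 1))) ↔
        (PySem.List.enumerate (l.drop (e + 1)) (0 + (e : Int) + 1)).filter
          (fun x => x.2.1 != x.2.2) = [] := by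
      rw [pvFilterNil]
      rw [pvEqPairs _ _ (by simp; omega), hzt]
    by_cases hr : (PySem.List.enumerate (l.drop (e + 1)) (0 + (e : Int) + 1)).filter
        (fun x => x.2.1 != x.2.2) = []
    · rw [hr, hle]
      show _ = if a[e] = '0' ∧ b[e] = '1' then (true, (0 : Int) + (e : Int)) else (false, -1)
      by_cases hc : a[e] = '0' ∧ b[e] = '1'
      · rw [if_pos ⟨hc.1, hc.2, hsuffix.mpr hr⟩, if_pos hc]
        simp
      · rw [if_neg (fun hx => hc ⟨hx.1, hx.2.1⟩), if_neg hc]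
    · rcases List.exists_cons_of_ne_nil hr with ⟨y, ys, hys⟩
      rw [hys, hle]
      rw [if_neg (fun hx => hr (hsuffix.mp hx.2.2))]
  · rw [dif_neg hlt]
    have : e = min a.length b.length := by
      have := pvEqLen_le l
      omega
    rw [if_pos this]

-- ===== VERDICT (by name: the statement is the Claim_ definition above) =====
theorem is_valid_map_spec : Claim_equal_is_valid_map := by
  intro pre post _
  unfold Spec_is_valid_map is_valid_map
  rw [pvAltEq, pvLoopA_start]
  intro x hx
  rw [PySem.List.mem_enumerate_iff] at hx
  obtain ⟨k, hk, rfl⟩ := hx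
  simp
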